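-- pv_equiv track=rewrite | github.com/reza0310/wishlist | scripts/preprocessor/TOML_parser.py | clean_toml
-- ===== SOURCE A (Python) =====
-- containers = (('"', '"', False), ("'", "'", False), ("[", "]", True), ("{", "}", True), ("(", ")", True))
--
-- openers = [x[0] for x in containers]
--
-- def get_out(string: str, index: int) -> int:
--     """
--     ENTRÉE: L'index d'un opener
--     SORTIE: L'index du closer associé
--     """
--     if string[index] not in openers:
--         raise Exception("GET_OUT CALLED ON WRONG VALUE")
--     pile = 1
--     container = containers[openers.index(string[index])]
--     while pile > 0:
--         index += 1
--         if string[index] == container[1] and string[index-1] != "\\":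
--             pile -= 1
--         elif string[index] == container[0] and string[index-1] != "\\":  # index ne peut pas être 0 ici
--             pile += 1
--     return index
--
-- def clean_toml(toml: str) -> str:
--     """
--     ENTRÉE: Un document TOML tel quel
--     SORTIE: Le même document mais sans aucun caractère inutile
--     """
--     # On veut tej les commentaires, indentations, espaces et lignes vides hors immutables
--     # On fait un parcours des mutables
--     index = 0
--     while index < len(toml):
--         if toml[index] in openers and not containers[openers.index(toml[index])][2]:
--             index = get_out(toml, index)
--         elif toml[index] == "\t" or toml[index] == " " or (toml[index] == "\n" and (index == 0 or toml[index-1] == "\n")):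
--             toml = toml[:index]+toml[index+1:]
--             index -= 1
--         elif toml[index] == "#":
--             while index < len(toml) and toml[index] != "\n":
--                 toml = toml[:index]+toml[index+1:]
--             index -= 1
--         index += 1
--
--     return toml
-- ===== SOURCE B (Python) =====
-- def clean_toml(toml: str) -> str:
--     """Single left-to-right pass over the immutable input: emit kept chunks into a
--     list and join, instead of repeatedly deleting characters from the string."""
--     out = []
--     i = 0
--     n = len(toml)
--     while i < n:
--         c = toml[i]
--         if c == '"' or c == "'":
--             j = i + 1
--             # IndexError on an unterminated quote, like the original scanner
--             while toml[j] != c or toml[j - 1] == "\\":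
--                 j += 1
--             out.append(toml[i:j + 1])
--             i = j + 1
--         elif c == " " or c == "\t":
--             i += 1
--         elif c == "#":
--             while i < n and toml[i] != "\n":
--                 i += 1
--         elif c == "\n" and (not out or out[-1][-1] == "\n"):
--             i += 1
--         else:
--             out.append(c)
--             i += 1
--     return "".join(out)
-- ===== Notes on version B (the rewrite author's own statement) =====
-- stated objective: alternative
-- what changed: A repeatedly deletes characters in place (rebuilding the string by slicing at every removed space/comment character, with index rollback); B makes one left-to-right pass over the immutable input, copying quoted spans whole and emitting kept chunks into a list joined once at the end.
import Mathlib
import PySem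

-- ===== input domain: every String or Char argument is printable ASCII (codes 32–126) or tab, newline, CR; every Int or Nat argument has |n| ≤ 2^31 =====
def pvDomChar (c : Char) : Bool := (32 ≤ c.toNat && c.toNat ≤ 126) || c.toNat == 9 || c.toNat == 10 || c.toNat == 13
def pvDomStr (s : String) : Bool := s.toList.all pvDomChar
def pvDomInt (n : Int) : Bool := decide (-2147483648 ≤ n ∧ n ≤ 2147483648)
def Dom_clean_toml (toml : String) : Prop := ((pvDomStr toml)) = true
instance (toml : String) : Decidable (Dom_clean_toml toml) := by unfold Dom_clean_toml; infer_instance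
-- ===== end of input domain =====

-- B replaces A's repeated in-place character deletions (string surgery at each removed
-- character) by a single left-to-right pass that emits kept chunks and joins them.
-- The loops are ported with a fuel parameter (length + 1, always sufficient) purely to
-- make them total structural recursions; fuel exhaustion coincides with the none
-- (IndexError) paths excluded by Pre_clean_toml.

-- ===== PORT A =====

def containersA : List (Char × Char × Bool) :=
  [('"', '"', false), ('\'', '\'', false), ('[', ']', true), ('{', '}', true), ('(', ')', true)]

def openersA : List Char := ['"', '\'', '[', '{', '(']

-- containers[openers.index(c)] : the (unique) container whose opener is c
def containerOf (c : Char) : Char × Char × Bool :=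
  (containersA.find? (fun x => x.1 = c)).getD (' ', ' ', true)

-- the `while pile > 0` loop of get_out; none = IndexError (string[index] past the end)
def getOutLoop : Nat → List Char → Char × Char × Bool → Nat → Nat → Option Nat
  | 0, _, _, _, _ => none
  | fuel + 1, s, cont, pile, index =>
    if pile = 0 then some index
    else if index + 1 < s.length then
      if s.getD (index + 1) ' ' = cont.2.1 ∧ s.getD index ' ' ≠ '\\' then
        getOutLoop fuel s cont (pile - 1) (index + 1)
      else if s.getD (index + 1) ' ' = cont.1 ∧ s.getD index ' ' ≠ '\\' then
        getOutLoop fuel s cont (pile + 1) (index + 1)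
      else getOutLoop fuel s cont pile (index + 1)
    else none

-- get_out; none = IndexError (the initial guard's Exception is unreachable from clean_toml)
def getOut (s : List Char) (index : Nat) : Option Nat :=
  if s.getD index ' ' ∈ openersA then
    getOutLoop (s.length + 1) s (containerOf (s.getD index ' ')) 1 index
  else none

-- the inner `while index < len(toml) and toml[index] != "\n"` deletion loop of the '#' branch
def delComment : Nat → List Char → Nat → List Char
  | 0, s, _ => s
  | fuel + 1, s, index =>
    if index < s.length ∧ s.getD index ' ' ≠ '\n' then
      delComment fuel (s.take index ++ s.drop (index + 1)) index
    else s

-- the main `while index < len(toml)` loop of clean_toml; the deletion branches keep the same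
-- index because A's `index -= 1` is cancelled by the trailing `index += 1`; none = IndexError
def loopA : Nat → List Char → Nat → Option (List Char)
  | 0, _, _ => none
  | fuel + 1, toml, index =>
    if index < toml.length then
      if toml.getD index ' ' ∈ openersA ∧ (containerOf (toml.getD index ' ')).2.2 = false then
        match getOut toml index with
        | none => none
        | some j => loopA fuel toml (j + 1)
      else if toml.getD index ' ' = '\t' ∨ toml.getD index ' ' = ' ' ∨
          (toml.getD index ' ' = '\n' ∧ (index = 0 ∨ toml.getD (index - 1) ' ' = '\n')) then
        loopA fuel (toml.take index ++ toml.drop (index + 1)) index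
      else if toml.getD index ' ' = '#' then
        loopA fuel (delComment (toml.length + 1) toml index) index
      else loopA fuel toml (index + 1)
    else some toml

def clean_toml (toml : String) : String :=
  match loopA (toml.toList.length + 1) toml.toList 0 with
  | some l => String.ofList l
  | none => ""   -- unreachable under Pre_clean_toml (IndexError in Python)

-- ===== PORT B =====

-- the inner `while toml[j] != c or toml[j-1] == "\\"` scan; none = IndexError
def scanQuote : Nat → List Char → Char → Nat → Option Nat
  | 0, _, _, _ => none
  | fuel + 1, s, c, j =>
    if j < s.length then
      if s.getD j ' ' = c ∧ s.getD (j - 1) ' ' ≠ '\\' then some j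
      else scanQuote fuel s c (j + 1)
    else none

-- the inner `while i < n and toml[i] != "\n"` skip of the '#' branch
def skipComment : Nat → List Char → Nat → Nat
  | 0, _, i => i
  | fuel + 1, s, i =>
    if i < s.length ∧ s.getD i ' ' ≠ '\n' then skipComment fuel s (i + 1) else i

-- the main while loop of B: out is the Python list of emitted chunks, joined at the end;
-- (s.drop i).take (j + 1 - i) is toml[i:j+1] (exact: 0 ≤ i ≤ j + 1 here); none = IndexError
def loopB : Nat → List Char → Nat → List (List Char) → Option (List Char)
  | 0, _, _, _ => none
  | fuel + 1, s, i, out =>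
    if i < s.length then
      if s.getD i ' ' = '"' ∨ s.getD i ' ' = '\'' then
        match scanQuote (s.length + 1) s (s.getD i ' ') (i + 1) with
        | none => none
        | some j => loopB fuel s (j + 1) (out ++ [(s.drop i).take (j + 1 - i)])
      else if s.getD i ' ' = ' ' ∨ s.getD i ' ' = '\t' then loopB fuel s (i + 1) out
      else if s.getD i ' ' = '#' then loopB fuel s (skipComment (s.length + 1) s i) out
      else if s.getD i ' ' = '\n' ∧ (out = [] ∨ (out.getLastD []).getLast? = some '\n') then
        loopB fuel s (i + 1) out
      else loopB fuel s (i + 1) (out ++ [[s.getD i ' ']])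
    else some out.flatten

def clean_toml_alt (toml : String) : String :=
  match loopB (toml.toList.length + 1) toml.toList 0 [] with
  | some l => String.ofList l
  | none => ""   -- unreachable under Pre_clean_toml (IndexError in Python)

-- ===== PRECONDITION & SPEC =====

-- Pre_: every quote opened outside a comment has a matching unescaped closing quote,
-- stated as a one-pass state machine over the characters (mode: none = plain text,
-- some none = inside a comment, some (some qc) = inside a qc-quoted string; prev is the
-- previous character, for the backslash-escape rule).
-- On the excluded inputs both Pythons raise IndexError (A in get_out, B in its quote scan).
def wqStep (mode : Option (Option Char)) (prev ch : Char) : Option (Option Char) :=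
  match mode with
  | none => if ch = '"' ∨ ch = '\'' then some (some ch) else if ch = '#' then some none else none
  | some none => if ch = '\n' then none else some none
  | some (some qc) => if ch = qc ∧ prev ≠ '\\' then none else some (some qc)

def wqLoop (mode : Option (Option Char)) (prev : Char) : List Char → Bool
  | [] => match mode with
    | some (some _) => false
    | _ => true
  | ch :: rest => wqLoop (wqStep mode prev ch) ch rest

def Pre_clean_toml (toml : String) : Prop := wqLoop none ' ' toml.toList = true
instance (toml : String) : Decidable (Pre_clean_toml toml) := by unfold Pre_clean_toml; infer_instance

def pvWitness_clean_toml : String := "a = \"x\" # c\n"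

def Spec_clean_toml (toml : String) (out : String) : Prop := out = clean_toml_alt toml
instance (toml : String) (out : String) : Decidable (Spec_clean_toml toml out) := by unfold Spec_clean_toml; infer_instance

-- ===== CLAIM (what is proved, stated in full; the proofs are below) =====
def Claim_equal_clean_toml : Prop := ∀ (toml : String), Dom_clean_toml toml → Pre_clean_toml toml → Spec_clean_toml toml (clean_toml toml)

-- ===== LEMMAS AND PROOFS =====

-- index↔list toolkit
theorem getD_drop (s : List Char) (i : Nat) : s.getD i ' ' = (s.drop i).headD ' ' := by
  induction s generalizing i with
  | nil => simp
  | cons x xs ih => cases i with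
    | zero => simp
    | succ n => simpa using ih n

theorem drop_succ_of_drop (s : List Char) (i : Nat) (x : Char) (xs : List Char)
    (h : s.drop i = x :: xs) : s.drop (i + 1) = xs := by
  rw [← List.tail_drop, h]; rfl

theorem lt_length_of_drop (s : List Char) (i : Nat) (x : Char) (xs : List Char)
    (h : s.drop i = x :: xs) : i < s.length := by
  by_contra hc
  rw [List.drop_eq_nil_of_le (by omega)] at h
  simp at h

theorem getD_of_drop (s : List Char) (i : Nat) (x : Char) (xs : List Char)
    (h : s.drop i = x :: xs) : s.getD i ' ' = x := by
  rw [getD_drop, h]; rfl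

theorem getD_at (done t : List Char) : (done ++ t).getD done.length ' ' = t.headD ' ' := by
  rw [getD_drop, List.drop_left]

-- semantic middle layer: the cleaning function stated structurally on the character list.
-- takeQuote c prev t = (span up to and including the first unescaped closer, remainder)
def takeQuote (c prev : Char) : List Char → Option (List Char × List Char)
  | [] => none
  | x :: xs =>
    if x = c ∧ prev ≠ '\\' then some ([x], xs)
    else match takeQuote c x xs with
      | none => none
      | some (a, b) => some (x :: a, b)

theorem takeQuote_eq (c : Char) : ∀ (t : List Char) (prev : Char) (q t' : List Char),
    takeQuote c prev t = some (q, t') → t = q ++ t' ∧ q ≠ [] ∧ q.getLast? = some c := by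
  intro t
  induction t with
  | nil => intro prev q t' h; simp [takeQuote] at h
  | cons x xs ih =>
    intro prev q t' h
    rw [takeQuote] at h
    split at h
    · rename_i hx
      simp at h
      obtain ⟨h1, h2⟩ := h
      subst h1; subst h2
      exact ⟨rfl, by simp, by simp [hx.1]⟩
    · split at h
      · simp at h
      · rename_i a b hab
        simp at h
        obtain ⟨h1, h2⟩ := h
        obtain ⟨e1, e2, e3⟩ := ih x a b hab
        subst h1; subst h2; subst e1
        refine ⟨by simp, by simp, ?_⟩
        rw [List.getLast?_cons, e3]; simp

def cleanR : List Char → Option Char → Option (List Char)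
  | [], _ => some []
  | c :: t, last =>
    if c = '"' ∨ c = '\'' then
      match hq : takeQuote c c t with
      | none => none
      | some (q, t') => (cleanR t' (some c)).map (fun r => c :: (q ++ r))
    else if c = ' ' ∨ c = '\t' then cleanR t last
    else if c = '#' then cleanR (t.dropWhile (· ≠ '\n')) last
    else if c = '\n' ∧ (last = none ∨ last = some '\n') then cleanR t last
    else (cleanR t (some c)).map (fun r => c :: r)
termination_by l _ => l.length
decreasing_by
  · have := takeQuote_eq c t c q t' hq
    obtain ⟨e1, e2, _⟩ := this
    subst e1; simp
  · simp
  · have := List.length_dropWhile_le (p := fun x => decide (x ≠ '\n')) t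
    simp at this ⊢
    omega
  · simp
  · simp

-- both quote scanners compute the same split as takeQuote (A side)
theorem getOutLoop_quote (c : Char) : ∀ (t s : List Char) (idx fuel : Nat),
    s.drop (idx + 1) = t → t.length < fuel →
    getOutLoop fuel s (c, c, false) 1 idx =
      (takeQuote c (s.getD idx ' ') t).map (fun p => idx + p.1.length) := by
  intro t
  induction t with
  | nil =>
    intro s idx fuel hdrop hfuel
    cases fuel with
    | zero => omega
    | succ f =>
      rw [getOutLoop]
      have : ¬ (idx + 1 < s.length) := by
        intro hlt
        have := List.drop_eq_nil_iff.mp hdrop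
        omega
      simp [this, takeQuote]
  | cons x xs ih =>
    intro s idx fuel hdrop hfuel
    cases fuel with
    | zero => omega
    | succ f =>
      have hlt : idx + 1 < s.length := lt_length_of_drop s (idx + 1) x xs hdrop
      have hx : s.getD (idx + 1) ' ' = x := getD_of_drop s (idx + 1) x xs hdrop
      have hxs : s.drop (idx + 2) = xs := drop_succ_of_drop s (idx + 1) x xs hdrop
      rw [getOutLoop]
      simp only [Nat.one_ne_zero, if_false, if_pos hlt, hx]
      rw [takeQuote]
      by_cases hc : x = c ∧ s.getD idx ' ' ≠ '\\'
      · rw [if_pos hc, if_pos hc]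
        cases f with
        | zero => simp at hfuel
        | succ f' => rw [getOutLoop]; simp
      · rw [if_neg hc, if_neg hc, if_neg hc]
        rw [ih s (idx + 1) f hxs (by simp at hfuel; omega), hx]
        cases htq : takeQuote c x xs with
        | none => simp
        | some p =>
          obtain ⟨a, b⟩ := p
          simp; omega

-- (B side)
theorem scanQuote_quote (c : Char) : ∀ (t s : List Char) (i fuel : Nat),
    s.drop (i + 1) = t → t.length < fuel →
    scanQuote fuel s c (i + 1) =
      (takeQuote c (s.getD i ' ') t).map (fun p => i + p.1.length) := by
  intro t
  induction t with
  | nil =>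
    intro s i fuel hdrop hfuel
    cases fuel with
    | zero => omega
    | succ f =>
      rw [scanQuote]
      have : ¬ (i + 1 < s.length) := by
        intro hlt
        have := List.drop_eq_nil_iff.mp hdrop
        omega
      simp [this, takeQuote]
  | cons x xs ih =>
    intro s i fuel hdrop hfuel
    cases fuel with
    | zero => omega
    | succ f =>
      have hlt : i + 1 < s.length := lt_length_of_drop s (i + 1) x xs hdrop
      have hx : s.getD (i + 1) ' ' = x := getD_of_drop s (i + 1) x xs hdrop
      have hxs : s.drop (i + 2) = xs := drop_succ_of_drop s (i + 1) x xs hdrop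
      rw [scanQuote]
      simp only [if_pos hlt, hx]
      have hprev : i + 1 - 1 = i := by omega
      rw [hprev, takeQuote]
      by_cases hc : x = c ∧ s.getD i ' ' ≠ '\\'
      · rw [if_pos ⟨hc.1, hc.2⟩, if_pos hc]
        simp
      · rw [if_neg (by tauto), if_neg hc]
        rw [ih s (i + 1) f hxs (by simp at hfuel; omega), hx]
        cases htq : takeQuote c x xs with
        | none => simp
        | some p =>
          obtain ⟨a, b⟩ := p
          simp; omega

-- comment removal (A side): delComment deletes exactly up to the next newline
theorem delComment_spec : ∀ (t done : List Char) (fuel : Nat), t.length < fuel →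
    delComment fuel (done ++ t) done.length = done ++ t.dropWhile (· ≠ '\n') := by
  intro t
  induction t with
  | nil =>
    intro done fuel hfuel
    cases fuel with
    | zero => omega
    | succ f =>
      rw [delComment]
      rw [if_neg (by simp)]
      simp
  | cons x xs ih =>
    intro done fuel hfuel
    cases fuel with
    | zero => omega
    | succ f =>
      have hget : (done ++ x :: xs).getD done.length ' ' = x := by rw [getD_at]; rfl
      by_cases hx : x = '\n'
      · rw [delComment, if_neg (by rw [hget]; simp [hx])]
        simp [List.dropWhile, hx]
      · rw [delComment, if_pos ⟨by simp, by rw [hget]; exact hx⟩]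
        have h1 : (done ++ x :: xs).take done.length = done := List.take_left
        have h2 : (done ++ x :: xs).drop (done.length + 1) = xs := by
          apply drop_succ_of_drop
          rw [List.drop_left]
        rw [h1, h2, ih done f (by simp at hfuel; omega)]
        simp [List.dropWhile, hx]

-- comment skip (B side)
theorem skipComment_drop : ∀ (t s : List Char) (i fuel : Nat),
    s.drop i = t → t.length < fuel →
    s.drop (skipComment fuel s i) = t.dropWhile (· ≠ '\n') := by
  intro t
  induction t with
  | nil =>
    intro s i fuel hdrop hfuel
    cases fuel with
    | zero => omega
    | succ f =>
      rw [skipComment]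
      have : ¬ (i < s.length) := by
        have := List.drop_eq_nil_iff.mp hdrop; omega
      rw [if_neg (by tauto)]
      simp [hdrop]
  | cons x xs ih =>
    intro s i fuel hdrop hfuel
    cases fuel with
    | zero => omega
    | succ f =>
      have hlt : i < s.length := lt_length_of_drop s i x xs hdrop
      have hx : s.getD i ' ' = x := getD_of_drop s i x xs hdrop
      have hxs : s.drop (i + 1) = xs := drop_succ_of_drop s i x xs hdrop
      by_cases hnl : x = '\n'
      · rw [skipComment, if_neg (by rw [hx]; simp [hnl])]
        simp [hdrop, List.dropWhile, hnl]
      · rw [skipComment, if_pos ⟨hlt, by rw [hx]; exact hnl⟩]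
        rw [ih s (i + 1) f hxs (by simp at hfuel; omega)]
        simp [List.dropWhile, hnl]

-- nonempty-chunk facts for B's output list
theorem flatten_ne_nil (out : List (List Char)) (h : ∀ ch ∈ out, ch ≠ []) (hne : out ≠ []) :
    out.flatten ≠ [] := by
  cases out with
  | nil => exact absurd rfl hne
  | cons x xs =>
    have hx : x ≠ [] := h x (by simp)
    cases x with
    | nil => exact absurd rfl hx
    | cons c cs => simp

theorem flatten_getLast (out : List (List Char)) (h : ∀ ch ∈ out, ch ≠ []) :
    out.flatten.getLast? = (out.getLastD []).getLast? := by
  induction out with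
  | nil => simp
  | cons x xs ih =>
    cases hxs : xs with
    | nil => simp
    | cons y ys =>
      rw [← hxs]
      have hne : xs ≠ [] := by rw [hxs]; simp
      have hfl : xs.flatten ≠ [] := flatten_ne_nil xs (fun ch hch => h ch (by simp [hch])) hne
      have : (x :: xs).flatten = x ++ xs.flatten := by simp
      rw [this, List.getLast?_append_of_ne_nil _ hfl, ih (fun ch hch => h ch (by simp [hch]))]
      cases xs with
      | nil => exact absurd rfl hne
      | cons _ _ => simp

-- A's newline test (index = 0 or previous char is '\n') in terms of the emitted prefix
theorem getD_pred (done r : List Char) (h : done ≠ []) :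
    (done ++ r).getD (done.length - 1) ' ' = (done.getLast?).getD ' ' := by
  have hlt : done.length - 1 < done.length := by
    cases done with
    | nil => exact absurd rfl h
    | cons _ _ => simp
  rw [List.getLast?_eq_getElem?]
  unfold List.getD
  rw [List.getElem?_append_left hlt]

-- ===== main lemma, A side =====
theorem loopA_spec : ∀ (fuel : Nat) (rest done : List Char), rest.length < fuel →
    loopA fuel (done ++ rest) done.length = (cleanR rest done.getLast?).map (fun r => done ++ r) := by
  intro fuel
  induction fuel with
  | zero => intro rest done hlen; omega
  | succ n ih =>
    intro rest done hlen
    cases rest with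
    | nil =>
      rw [loopA, if_neg (by simp), cleanR]
      simp
    | cons c t =>
      have hlt : done.length < (done ++ c :: t).length := by simp
      have hget : (done ++ c :: t).getD done.length ' ' = c := by rw [getD_at]; rfl
      have hdrop1 : (done ++ c :: t).drop (done.length + 1) = t := by
        apply drop_succ_of_drop; rw [List.drop_left]
      rw [loopA, if_pos hlt]
      by_cases hquote : c = '"' ∨ c = '\''
      · -- quoted span: A jumps with get_out
        have hcont : containerOf c = (c, c, false) := by
          rcases hquote with h | h <;> subst h <;> rfl
        have hcond : (done ++ c :: t).getD done.length ' ' ∈ openersA ∧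
            (containerOf ((done ++ c :: t).getD done.length ' ')).2.2 = false := by
          rw [hget, hcont]
          refine ⟨?_, rfl⟩
          rcases hquote with h | h <;> subst h <;> decide
        rw [if_pos hcond]
        have hgo : getOut (done ++ c :: t) done.length =
            (takeQuote c c t).map (fun p => done.length + p.1.length) := by
          unfold getOut
          rw [hget, if_pos (show c ∈ openersA by
            rcases hquote with h | h <;> subst h <;> decide), hcont]
          rw [getOutLoop_quote c t (done ++ c :: t) done.length ((done ++ c :: t).length + 1)
            hdrop1 (by simp; omega), hget]
        rw [cleanR, if_pos hquote]
        cases htq : takeQuote c c t with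
        | none =>
          rw [htq] at hgo
          simp only [Option.map_none] at hgo
          split
          · simp
          · rename_i j heq
            rw [heq] at hgo
            exact absurd hgo (by simp)
        | some p =>
          obtain ⟨q, t'⟩ := p
          obtain ⟨e1, e2, e3⟩ := takeQuote_eq c t c q t' htq
          rw [htq] at hgo
          simp only [Option.map_some] at hgo
          split
          · rename_i heq
            rw [heq] at hgo
            exact absurd hgo (by simp)
          · rename_i j heq
            rw [heq] at hgo
            have hj : j = done.length + q.length := by simpa using hgo
            subst hj
            show loopA n (done ++ c :: t) (done.length + q.length + 1) =
              Option.map (fun r => done ++ r)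
                (Option.map (fun r => c :: (q ++ r)) (cleanR t' (some c)))
            have hrw : done ++ c :: t = (done ++ c :: q) ++ t' := by
              subst e1; simp
            have hidx : done.length + q.length + 1 = (done ++ c :: q).length := by simp; omega
            rw [hrw, hidx]
            rw [ih t' (done ++ c :: q) (by subst e1; simp at hlen ⊢; cases q with
              | nil => exact absurd rfl e2
              | cons _ _ => simp at hlen ⊢; omega)]
            have hlast : (done ++ c :: q).getLast? = some c := by
              rw [List.getLast?_append_of_ne_nil _ (by simp)]
              rw [List.getLast?_cons, e3]
              simp
            rw [hlast]
            cases cleanR t' (some c) with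
            | none => simp
            | some r => simp
      · -- not a quote
        have hnq : ¬ ((done ++ c :: t).getD done.length ' ' ∈ openersA ∧
            (containerOf ((done ++ c :: t).getD done.length ' ')).2.2 = false) := by
          rw [hget]
          rintro ⟨hmem, hmut⟩
          simp [openersA] at hmem
          rcases hmem with h | h | h | h | h <;> subst h <;> first
            | exact hquote (by tauto)
            | simp [containerOf, containersA] at hmut
        rw [if_neg hnq]
        have hdel : (done ++ c :: t).take done.length ++ (done ++ c :: t).drop (done.length + 1)
            = done ++ t := by rw [List.take_left, hdrop1]
        by_cases hsp : c = ' ' ∨ c = '\t'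
        · have hcond2 : (done ++ c :: t).getD done.length ' ' = '\t' ∨
              (done ++ c :: t).getD done.length ' ' = ' ' ∨
              ((done ++ c :: t).getD done.length ' ' = '\n' ∧
                (done.length = 0 ∨ (done ++ c :: t).getD (done.length - 1) ' ' = '\n')) := by
            rw [hget]; tauto
          rw [if_pos hcond2, hdel]
          rw [ih t done (by simp at hlen; omega)]
          rw [cleanR, if_neg (by rcases hsp with h | h <;> subst h <;> decide), if_pos hsp]
        · -- A's newline-deletion test equals the last-emitted-character test
          have hnlEquiv : (done.length = 0 ∨ (done ++ c :: t).getD (done.length - 1) ' ' = '\n')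
              ↔ (done.getLast? = none ∨ done.getLast? = some '\n') := by
            cases hdone : done with
            | nil => simp
            | cons d ds =>
              rw [← hdone]
              have hne : done ≠ [] := by rw [hdone]; simp
              rw [getD_pred done (c :: t) hne]
              constructor
              · rintro (h | h)
                · exact absurd h (by rw [hdone]; simp)
                · right
                  cases hl : done.getLast? with
                  | none => exact absurd (List.getLast?_eq_none_iff.mp hl) hne
                  | some ch => rw [hl] at h; simp at h; rw [h]
              · rintro (h | h)
                · exact absurd (List.getLast?_eq_none_iff.mp h) hne
                · right; rw [h]; rfl
          by_cases hcm : c = '#'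
          · have hcond2 : ¬ ((done ++ c :: t).getD done.length ' ' = '\t' ∨
                (done ++ c :: t).getD done.length ' ' = ' ' ∨
                ((done ++ c :: t).getD done.length ' ' = '\n' ∧
                  (done.length = 0 ∨ (done ++ c :: t).getD (done.length - 1) ' ' = '\n'))) := by
              rw [hget]; subst hcm; simp
            rw [if_neg hcond2, if_pos (by rw [hget]; exact hcm)]
            have : delComment ((done ++ c :: t).length + 1) (done ++ c :: t) done.length
                = done ++ t.dropWhile (· ≠ '\n') := by
              rw [delComment_spec (c :: t) done ((done ++ c :: t).length + 1) (by simp only [List.length_append, List.length_cons]; omega)]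
              subst hcm
              simp [List.dropWhile]
            rw [this]
            rw [ih (t.dropWhile (· ≠ '\n')) done
              (by have hdw := List.length_dropWhile_le (fun x => decide (x ≠ '\n')) t; simp at hlen; omega)]
            rw [cleanR, if_neg (by subst hcm; decide), if_neg (by subst hcm; decide),
              if_pos hcm]
          · by_cases hnl : c = '\n' ∧ (done.getLast? = none ∨ done.getLast? = some '\n')
            · have hcond2 : (done ++ c :: t).getD done.length ' ' = '\t' ∨
                  (done ++ c :: t).getD done.length ' ' = ' ' ∨
                  ((done ++ c :: t).getD done.length ' ' = '\n' ∧
                    (done.length = 0 ∨ (done ++ c :: t).getD (done.length - 1) ' ' = '\n')) := by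
                rw [hget]
                exact Or.inr (Or.inr ⟨hnl.1, hnlEquiv.mpr hnl.2⟩)
              rw [if_pos hcond2, hdel]
              rw [ih t done (by simp at hlen; omega)]
              rw [cleanR, if_neg (by have := hnl.1; subst this; decide),
                if_neg (by have := hnl.1; subst this; decide),
                if_neg (by have := hnl.1; subst this; decide), if_pos hnl]
            · -- ordinary character: emitted
              have hcond2 : ¬ ((done ++ c :: t).getD done.length ' ' = '\t' ∨
                  (done ++ c :: t).getD done.length ' ' = ' ' ∨
                  ((done ++ c :: t).getD done.length ' ' = '\n' ∧
                    (done.length = 0 ∨ (done ++ c :: t).getD (done.length - 1) ' ' = '\n'))) := by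
                rw [hget]
                rintro (h | h | ⟨h1, h2⟩)
                · exact hsp (Or.inr h)
                · exact hsp (Or.inl h)
                · exact hnl ⟨h1, hnlEquiv.mp h2⟩
              rw [if_neg hcond2, if_neg (by rw [hget]; exact hcm)]
              have hrw : done ++ c :: t = (done ++ [c]) ++ t := by simp
              have hidx : done.length + 1 = (done ++ [c]).length := by simp
              rw [hrw, hidx]
              rw [ih t (done ++ [c]) (by simp at hlen; omega)]
              have hlast : (done ++ [c]).getLast? = some c := by simp
              rw [hlast]
              rw [cleanR, if_neg hquote, if_neg hsp, if_neg hcm,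
                if_neg (by rintro ⟨h1, h2⟩; exact hnl ⟨h1, h2⟩)]
              cases cleanR t (some c) with
              | none => simp
              | some r => simp

-- ===== main lemma, B side =====
theorem loopB_spec : ∀ (fuel : Nat) (rest : List Char) (s : List Char) (i : Nat)
    (out : List (List Char)), s.drop i = rest → rest.length < fuel → (∀ ch ∈ out, ch ≠ []) →
    loopB fuel s i out = (cleanR rest out.flatten.getLast?).map (fun r => out.flatten ++ r) := by
  intro fuel
  induction fuel with
  | zero => intro rest s i out hdrop hlen hinv; omega
  | succ n ih =>
    intro rest s i out hdrop hlen hinv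
    cases rest with
    | nil =>
      have hge : ¬ (i < s.length) := by have := List.drop_eq_nil_iff.mp hdrop; omega
      rw [loopB, if_neg hge, cleanR]
      simp
    | cons c t =>
      have hlt : i < s.length := lt_length_of_drop s i c t hdrop
      have hget : s.getD i ' ' = c := getD_of_drop s i c t hdrop
      have hdrop1 : s.drop (i + 1) = t := drop_succ_of_drop s i c t hdrop
      rw [loopB, if_pos hlt]
      by_cases hquote : c = '"' ∨ c = '\''
      · rw [if_pos (by rw [hget]; exact hquote)]
        have hsq : scanQuote (s.length + 1) s (s.getD i ' ') (i + 1) =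
            (takeQuote c c t).map (fun p => i + p.1.length) := by
          rw [hget, scanQuote_quote c t s i (s.length + 1) hdrop1
            (by have := congrArg List.length hdrop1; simp at this; omega), hget]
        rw [cleanR, if_pos hquote]
        cases htq : takeQuote c c t with
        | none =>
          rw [htq] at hsq
          simp only [Option.map_none] at hsq
          split
          · simp
          · rename_i j heq
            rw [heq] at hsq
            exact absurd hsq (by simp)
        | some p =>
          obtain ⟨q, t'⟩ := p
          obtain ⟨e1, e2, e3⟩ := takeQuote_eq c t c q t' htq
          rw [htq] at hsq
          simp only [Option.map_some] at hsq
          have hchunk : (s.drop i).take (i + q.length + 1 - i) = c :: q := by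
            rw [hdrop, e1]
            have : i + q.length + 1 - i = q.length + 1 := by omega
            rw [this]
            simp [List.take_left]
          split
          · rename_i heq
            rw [heq] at hsq
            exact absurd hsq (by simp)
          · rename_i j heq
            rw [heq] at hsq
            have hj : j = i + q.length := by simpa using hsq
            subst hj
            show loopB n s (i + q.length + 1) (out ++ [(s.drop i).take (i + q.length + 1 - i)]) =
              Option.map (fun r => out.flatten ++ r)
                (Option.map (fun r => c :: (q ++ r)) (cleanR t' (some c)))
            rw [hchunk]
            have hdrop' : s.drop (i + q.length + 1) = t' := by
              have h1 : s.drop (i + 1) = q ++ t' := by rw [hdrop1, e1]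
              calc s.drop (i + q.length + 1) = (s.drop (i + 1)).drop q.length := by
                    rw [List.drop_drop]; congr 1; omega
                _ = t' := by rw [h1]; simp
            rw [ih t' s (i + q.length + 1) (out ++ [c :: q]) hdrop'
              (by subst e1; simp at hlen ⊢; cases q with
                | nil => exact absurd rfl e2
                | cons _ _ => simp at hlen ⊢; omega)
              (by intro ch hch; simp at hch; rcases hch with h | h
                  · exact hinv ch h
                  · subst h; simp)]
            have hfl : (out ++ [c :: q]).flatten = out.flatten ++ c :: q := by simp
            have hlast : (out ++ [c :: q]).flatten.getLast? = some c := by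
              rw [hfl, List.getLast?_append_of_ne_nil _ (by simp), List.getLast?_cons, e3]
              simp
            rw [hlast, hfl]
            cases cleanR t' (some c) with
            | none => simp
            | some r => simp
      · rw [if_neg (by rw [hget]; exact hquote)]
        by_cases hsp : c = ' ' ∨ c = '\t'
        · rw [if_pos (by rw [hget]; exact hsp)]
          rw [ih t s (i + 1) out hdrop1 (by simp at hlen; omega) hinv]
          rw [cleanR, if_neg hquote, if_pos hsp]
        · rw [if_neg (by rw [hget]; exact hsp)]
          by_cases hcm : c = '#'
          · rw [if_pos (by rw [hget]; exact hcm)]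
            have hsk : s.drop (skipComment (s.length + 1) s i) = t.dropWhile (· ≠ '\n') := by
              rw [skipComment_drop (c :: t) s i (s.length + 1) hdrop
                (by have hl := congrArg List.length hdrop; rw [List.length_drop] at hl; simp only [List.length_cons] at hl ⊢; omega)]
              subst hcm
              simp [List.dropWhile]
            rw [ih (t.dropWhile (· ≠ '\n')) s (skipComment (s.length + 1) s i) out hsk
              (by have hdw := List.length_dropWhile_le (fun x => decide (x ≠ '\n')) t; simp at hlen; omega) hinv]
            rw [cleanR, if_neg hquote, if_neg hsp, if_pos hcm]
          · rw [if_neg (by rw [hget]; exact hcm)]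
            have hcondEquiv : (out = [] ∨ (out.getLastD []).getLast? = some '\n') ↔
                (out.flatten.getLast? = none ∨ out.flatten.getLast? = some '\n') := by
              rw [flatten_getLast out hinv]
              constructor
              · rintro (h | h)
                · subst h; simp
                · right; exact h
              · rintro (h | h)
                · left
                  by_contra hne
                  have hout : out.flatten ≠ [] := flatten_ne_nil out hinv hne
                  rw [← flatten_getLast out hinv] at h
                  exact hout (List.getLast?_eq_none_iff.mp h)
                · right; exact h
            by_cases hnl : c = '\n' ∧
                (out.flatten.getLast? = none ∨ out.flatten.getLast? = some '\n')
            · rw [if_pos (by rw [hget]; exact ⟨hnl.1, hcondEquiv.mpr hnl.2⟩)]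
              rw [ih t s (i + 1) out hdrop1 (by simp at hlen; omega) hinv]
              rw [cleanR, if_neg hquote, if_neg hsp, if_neg hcm, if_pos hnl]
            · rw [if_neg (by rw [hget]; rintro ⟨h1, h2⟩; exact hnl ⟨h1, hcondEquiv.mp h2⟩)]
              rw [ih t s (i + 1) (out ++ [[s.getD i ' ']]) hdrop1 (by simp at hlen; omega)
                (by intro ch hch; simp at hch; rcases hch with h | h
                    · exact hinv ch h
                    · subst h; simp)]
              rw [hget]
              have hfl : (out ++ [[c]]).flatten = out.flatten ++ [c] := by simp
              have hlast : (out ++ [[c]]).flatten.getLast? = some c := by rw [hfl]; simp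
              rw [hlast, hfl]
              rw [cleanR, if_neg hquote, if_neg hsp, if_neg hcm, if_neg hnl]
              cases cleanR t (some c) with
              | none => simp
              | some r => simp

-- ===== VERDICT (by name: the statement is the Claim_ definition above) =====
theorem clean_toml_spec : Claim_equal_clean_toml := by
  intro toml _ _
  unfold Spec_clean_toml clean_toml clean_toml_alt
  have hA : loopA (toml.toList.length + 1) ([] ++ toml.toList) ([] : List Char).length =
      (cleanR toml.toList ([] : List Char).getLast?).map (fun r => [] ++ r) :=
    loopA_spec (toml.toList.length + 1) toml.toList [] (by omega)
  have hB : loopB (toml.toList.length + 1) toml.toList 0 [] =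
      (cleanR toml.toList (([] : List (List Char)).flatten.getLast?)).map
        (fun r => ([] : List (List Char)).flatten ++ r) :=
    loopB_spec (toml.toList.length + 1) toml.toList toml.toList 0 [] (by simp) (by omega) (by simp)
  simp only [List.nil_append, List.length_nil, List.getLast?_nil] at hA
  simp only [List.flatten_nil, List.getLast?_nil, List.nil_append] at hB
  rw [hA, hB]
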